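-- pv_equiv track=rewrite | github.com/animeshokhade/dsa | scaler/Beggars Outside Temple.py | solve
-- ===== SOURCE A (Python) =====
-- def solve(A, B):
--     beggars = [0] * A
--     L, R = 0, 0
--     rows = len(B)
--
--     for querry in range(rows):
--         L = B[querry][0]
--         R = B[querry][1]
--         P = B[querry][2]
--         beggars[L - 1] += P
--         if R != len(beggars):
--             beggars[R] -= P
--
--     for index in range(1, len(beggars)):
--         beggars[index] += beggars[index - 1]
--
--     return beggars
-- ===== SOURCE B (Python) =====
-- def solve(A, B):
--     # Each query [L, R, P] adds P to everything from position L-1 on and takes it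
--     # back from position R on; elementwise suffix updates, no prefix-sum pass.
--     total = [0] * A
--     for q in B:
--         total[q[0] - 1:] = [x + q[2] for x in total[q[0] - 1:]]
--         total[q[1]:] = [x - q[2] for x in total[q[1]:]]
--     return total
-- ===== Notes on version B (the rewrite author's own statement) =====
-- stated objective: alternative
-- what changed: Replaces the difference-array marking plus the final prefix-sum pass by direct elementwise suffix updates via slice assignment: each query adds P to the whole suffix starting at L-1 and subtracts P from the suffix starting at R, so no prefix pass and no end-of-array guard are needed.
import Mathlib
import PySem

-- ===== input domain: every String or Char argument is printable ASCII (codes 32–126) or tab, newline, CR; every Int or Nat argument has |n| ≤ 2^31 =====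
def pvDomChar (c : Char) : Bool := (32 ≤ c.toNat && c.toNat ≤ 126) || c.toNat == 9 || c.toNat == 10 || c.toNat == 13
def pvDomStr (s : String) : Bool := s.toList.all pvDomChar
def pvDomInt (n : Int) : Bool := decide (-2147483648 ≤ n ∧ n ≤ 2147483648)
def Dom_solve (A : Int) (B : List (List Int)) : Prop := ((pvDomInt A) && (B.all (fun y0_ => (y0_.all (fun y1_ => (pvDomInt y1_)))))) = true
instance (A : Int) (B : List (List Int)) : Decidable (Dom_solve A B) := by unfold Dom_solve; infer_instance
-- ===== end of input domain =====

-- B replaces the difference-array-plus-prefix-sum scheme by direct per-query range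
-- addition: each query's span is updated element by element, with no prefix pass.

-- ===== PORT A =====
-- one iteration of A's query loop: beggars[L-1] += P; if R != len(beggars): beggars[R] -= P
-- (pyGetD/pySetD are exact here: Pre_solve keeps every touched index in Python's legal range)
def solveStep (bg : List Int) (row : List Int) : List Int :=
  let L := PySem.List.pyGetD row 0 0
  let R := PySem.List.pyGetD row 1 0
  let P := PySem.List.pyGetD row 2 0
  let bg1 := PySem.List.pySetD bg (L - 1) (PySem.List.pyGetD bg (L - 1) 0 + P)
  if R ≠ PySem.List.len bg1 then
    PySem.List.pySetD bg1 R (PySem.List.pyGetD bg1 R 0 - P)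
  else bg1

-- one iteration of A's prefix-sum loop: beggars[index] += beggars[index-1]
def prefixStep (bg : List Int) (idx : Int) : List Int :=
  PySem.List.pySetD bg idx (PySem.List.pyGetD bg idx 0 + PySem.List.pyGetD bg (idx - 1) 0)

def solve (A : Int) (B : List (List Int)) : List Int :=
  let bg0 : List Int := List.replicate A.toNat 0
  let bg1 := (PySem.List.pyRange 0 (PySem.List.len B) 1).foldl
    (fun bg q => solveStep bg (PySem.List.pyGetD B q [])) bg0
  (PySem.List.pyRange 1 (PySem.List.len bg1) 1).foldl prefixStep bg1

-- ===== PORT B =====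
-- one query of B: total[q[0]-1:] = [x + q[2] for x in total[q[0]-1:]];
--                 total[q[1]:]   = [x - q[2] for x in total[q[1]:]]
-- (slice assignment with a same-length replacement list is exactly prefix ++ new suffix)
def bstep (total : List Int) (q : List Int) : List Int :=
  let P := PySem.List.pyGetD q 2 0
  let s1 := PySem.List.pyGetD q 0 0 - 1
  let t1 := PySem.List.slice total none (some s1) ++
    (PySem.List.slice total (some s1) none).map (fun x => x + P)
  let s2 := PySem.List.pyGetD q 1 0
  PySem.List.slice t1 none (some s2) ++
    (PySem.List.slice t1 (some s2) none).map (fun x => x - P)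

def solve_alt (A : Int) (B : List (List Int)) : List Int :=
  B.foldl bstep (List.replicate A.toNat 0)

-- ===== PRECONDITION & SPEC =====
-- Pre_solve is exactly A's no-exception domain: each query has at least three entries and its
-- two positions L-1 and R are legal Python indices of the length-A list (R may also equal A,
-- the branch A skips); outside Pre_solve A raises an IndexError.
def Pre_solve (A : Int) (B : List (List Int)) : Prop :=
  ∀ q ∈ B, 3 ≤ q.length ∧
    (-(A.toNat : Int) ≤ q.getD 0 0 - 1 ∧ q.getD 0 0 - 1 < (A.toNat : Int)) ∧
    (q.getD 1 0 = (A.toNat : Int) ∨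
      (-(A.toNat : Int) ≤ q.getD 1 0 ∧ q.getD 1 0 < (A.toNat : Int)))
instance (A : Int) (B : List (List Int)) : Decidable (Pre_solve A B) := by
  unfold Pre_solve; infer_instance

def pvWitness_solve : Int × List (List Int) := (3, [[1, 2, 5], [2, 3, 1]])

def Spec_solve (A : Int) (B : List (List Int)) (out : List Int) : Prop := out = solve_alt A B
instance (A : Int) (B : List (List Int)) (out : List Int) : Decidable (Spec_solve A B out) := by
  unfold Spec_solve; infer_instance

-- ===== CLAIM (what is proved, stated in full; the proofs are below) =====
def Claim_equal_solve : Prop :=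
  ∀ (A : Int) (B : List (List Int)), Dom_solve A B → Pre_solve A B → Spec_solve A B (solve A B)

-- ===== LEMMAS AND PROOFS =====

-- the per-position delta one query contributes in A (N = the Python value len(beggars))
def contrib (N : Int) (q : List Int) (j : Int) : Int :=
  (if (if q.getD 0 0 - 1 < 0 then q.getD 0 0 - 1 + N else q.getD 0 0 - 1) = j
    then q.getD 2 0 else 0) -
  (if q.getD 1 0 ≠ N ∧ (if q.getD 1 0 < 0 then q.getD 1 0 + N else q.getD 1 0) = j
    then q.getD 2 0 else 0)

-- the per-position total one query contributes in B (its two suffix updates at position k)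
def c2 (N : Int) (q : List Int) (k : Int) : Int :=
  (if (if q.getD 0 0 - 1 < 0 then q.getD 0 0 - 1 + N else q.getD 0 0 - 1) ≤ k
    then q.getD 2 0 else 0) -
  (if q.getD 1 0 ≠ N ∧ (if q.getD 1 0 < 0 then q.getD 1 0 + N else q.getD 1 0) ≤ k
    then q.getD 2 0 else 0)

lemma getD_set (l : List Int) (i j : Nat) (a d : Int) :
    (l.set i a).getD j d = if i = j ∧ j < l.length then a else l.getD j d := by
  simp [List.getD, List.getElem?_set]
  split_ifs with h1 h2 h3 h4 <;> first | (exfalso; omega) | simp_all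

lemma pySetD_wrap (xs : List Int) (i v : Int)
    (h1 : -(xs.length : Int) ≤ i) (h2 : i < (xs.length : Int)) :
    PySem.List.pySetD xs i v = xs.set (if i < 0 then i + xs.length else i).toNat v := by
  by_cases hneg : i < 0
  · rw [if_pos hneg]
    simp only [PySem.List.pySetD, PySem.List.pySet?, PySem.List.pyIdx?]
    rw [if_neg (by omega), if_pos (by omega)]
    simp only [Option.map_some, Option.getD_some]
    congr 1
    omega
  · rw [if_neg hneg, PySem.List.pySetD_of_nonneg xs v (by omega)]

lemma pyGetD_wrap (xs : List Int) (i d : Int)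
    (h1 : -(xs.length : Int) ≤ i) (h2 : i < (xs.length : Int)) :
    PySem.List.pyGetD xs i d = xs.getD (if i < 0 then i + xs.length else i).toNat d := by
  by_cases hneg : i < 0
  · rw [if_pos hneg]
    simp only [PySem.List.pyGetD, PySem.List.pyGet?, PySem.List.pyIdx?]
    rw [if_neg (by omega), if_pos (by omega)]
    simp only [List.getD]
    have hidx : xs.length - (-i).toNat = (i + ↑xs.length).toNat := by omega
    rw [hidx]
    simp
  · rw [if_neg hneg, PySem.List.pyGetD_eq_getElem xs d (by omega) (by omega)]
    rw [List.getD_eq_getElem _ _ (by omega)]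

lemma solveStep_length (bg row : List Int) : (solveStep bg row).length = bg.length := by
  simp only [solveStep]
  split_ifs <;> simp [PySem.List.length_pySetD]

lemma solveStep_getD (bg row : List Int)
    (hq : (-(bg.length : Int) ≤ row.getD 0 0 - 1 ∧ row.getD 0 0 - 1 < (bg.length : Int)) ∧
      (row.getD 1 0 = (bg.length : Int) ∨
        (-(bg.length : Int) ≤ row.getD 1 0 ∧ row.getD 1 0 < (bg.length : Int))))
    (k : Nat) (hk : k < bg.length) :
    (solveStep bg row).getD k 0 = bg.getD k 0 + contrib (bg.length : Int) row k := by
  obtain ⟨⟨hL1, hL2⟩, hR⟩ := hq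
  have e0 : PySem.List.pyGetD row 0 0 = row.getD 0 0 := by simp [pysem]
  have e1 : PySem.List.pyGetD row 1 0 = row.getD 1 0 := by simp [pysem]
  have e2 : PySem.List.pyGetD row 2 0 = row.getD 2 0 := by simp [pysem]
  set L := row.getD 0 0 with hL
  set R := row.getD 1 0 with hRdef
  set P := row.getD 2 0 with hP
  set t1 := if L - 1 < 0 then L - 1 + (bg.length : Int) else L - 1 with ht1
  have hb1 : 0 ≤ t1 ∧ t1 < (bg.length : Int) := by rw [ht1]; split_ifs <;> omega
  have hsub : PySem.List.pySetD bg (L - 1) (PySem.List.pyGetD bg (L - 1) 0 + P)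
      = bg.set t1.toNat (bg.getD t1.toNat 0 + P) := by
    rw [pySetD_wrap bg (L - 1) _ hL1 hL2, pyGetD_wrap bg (L - 1) 0 hL1 hL2]
  simp only [solveStep, e0, e1, e2, hsub]
  set bg1 := bg.set t1.toNat (bg.getD t1.toNat 0 + P) with hbg1
  have hlen1 : bg1.length = bg.length := by simp [hbg1]
  have hbg1getD : ∀ m : Nat, bg1.getD m 0
      = if t1.toNat = m ∧ m < bg.length then bg.getD t1.toNat 0 + P else bg.getD m 0 := by
    intro m; rw [hbg1, getD_set]
  set t2 := if R < 0 then R + (bg.length : Int) else R with ht2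
  rcases hR with hReq | ⟨hR1, hR2⟩
  · have : ¬ (R ≠ PySem.List.len bg1) := by simp [PySem.List.len_eq, hlen1, hReq]
    rw [if_neg this, hbg1getD k, contrib]
    rw [← hL, ← hRdef, ← hP, ← ht1, ← ht2]
    have c1 : (t1.toNat = k ∧ k < bg.length) ↔ t1 = (k : Int) := by omega
    simp only [c1]
    clear this hsub hbg1getD hbg1 hlen1 e0 e1 e2
    clear_value bg1
    clear bg1
    clear ht1 ht2 hL hRdef hP
    clear_value t1 t2 L R P
    split_ifs <;>
      first
        | (exfalso; omega)
        | ring1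
        | (have h1k : t1.toNat = k := by omega
           rw [h1k]; ring1)
  · have hRne : R ≠ (bg.length : Int) := by omega
    have hcond : (R ≠ PySem.List.len bg1) := by simp [PySem.List.len_eq, hlen1, hRne]
    rw [if_pos hcond]
    have hb2 : 0 ≤ t2 ∧ t2 < (bg.length : Int) := by rw [ht2]; split_ifs <;> omega
    have hsub2 : PySem.List.pySetD bg1 R (PySem.List.pyGetD bg1 R 0 - P)
        = bg1.set t2.toNat (bg1.getD t2.toNat 0 - P) := by
      have hl1 : -(bg1.length : Int) ≤ R := by omega
      have hl2 : R < (bg1.length : Int) := by omega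
      rw [pySetD_wrap bg1 R _ hl1 hl2, pyGetD_wrap bg1 R 0 hl1 hl2]
      rw [hlen1]
    rw [hsub2, getD_set, hlen1, hbg1getD, hbg1getD, contrib]
    rw [← hL, ← hRdef, ← hP, ← ht1, ← ht2]
    have c1 : (t1.toNat = k ∧ k < bg.length) ↔ t1 = (k : Int) := by omega
    have c2' : (t2.toNat = k ∧ k < bg.length) ↔ t2 = (k : Int) := by omega
    have c3 : (t1.toNat = t2.toNat ∧ t2.toNat < bg.length) ↔ t1 = t2 := by omega
    have c4 : (R ≠ (bg.length : Int) ∧ t2 = (k : Int)) ↔ t2 = (k : Int) := by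
      constructor
      · rintro ⟨_, h⟩; exact h
      · intro h; exact ⟨hRne, h⟩
    simp only [c1, c2', c3, c4]
    clear hcond hsub hsub2 hbg1getD hbg1 hlen1 e0 e1 e2 c4
    clear_value bg1
    clear bg1
    clear ht1 ht2 hL hRdef hP
    clear_value t1 t2 L R P
    split_ifs <;>
      first
        | (exfalso; omega)
        | ring1
        | (have h1k : t1.toNat = k := by omega
           rw [h1k]; ring1)
        | (have h2k : t2.toNat = k := by omega
           rw [h2k]; ring1)

lemma fold1_length (Bq : List (List Int)) (bg : List Int) :
    (Bq.foldl solveStep bg).length = bg.length := by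
  induction Bq generalizing bg with
  | nil => rfl
  | cons q qs ih => rw [List.foldl_cons, ih, solveStep_length]

lemma fold1_getD (Bq : List (List Int)) (bg : List Int)
    (hPre : ∀ q ∈ Bq,
      (-(bg.length : Int) ≤ q.getD 0 0 - 1 ∧ q.getD 0 0 - 1 < (bg.length : Int)) ∧
      (q.getD 1 0 = (bg.length : Int) ∨
        (-(bg.length : Int) ≤ q.getD 1 0 ∧ q.getD 1 0 < (bg.length : Int))))
    (k : Nat) (hk : k < bg.length) :
    (Bq.foldl solveStep bg).getD k 0 =
      bg.getD k 0 + (Bq.map (fun q => contrib (bg.length : Int) q k)).sum := by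
  induction Bq generalizing bg with
  | nil => simp
  | cons q qs ih =>
    rw [List.foldl_cons]
    have hlen : (solveStep bg q).length = bg.length := solveStep_length bg q
    rw [ih (solveStep bg q)
      (by intro q' hq'; rw [hlen]; exact hPre q' (List.mem_cons_of_mem q hq'))
      (by omega)]
    rw [solveStep_getD bg q (hPre q List.mem_cons_self) k hk]
    simp only [hlen, List.map_cons, List.sum_cons]
    ring

lemma prefix_fold (t : Nat) : ∀ (bg : List Int) (s : Nat), 1 ≤ s → bg.length - s ≤ t →
    ((PySem.List.pyRange (s : Int) (PySem.List.len bg) 1).foldl prefixStep bg).length = bg.length ∧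
    ∀ k, k < bg.length →
      ((PySem.List.pyRange (s : Int) (PySem.List.len bg) 1).foldl prefixStep bg).getD k 0 =
        if k < s then bg.getD k 0 else ∑ j ∈ Finset.Ico (s - 1) (k + 1), bg.getD j 0 := by
  induction t with
  | zero =>
    intro bg s hs ht
    rw [PySem.List.pyRange_one_eq_nil (by simp [PySem.List.len_eq]; omega)]
    refine ⟨by simp, fun k hk => ?_⟩
    simp only [List.foldl_nil]
    rw [if_pos (by omega)]
  | succ t ih =>
    intro bg s hs ht
    by_cases hlt : s < bg.length
    · rw [PySem.List.pyRange_one_cons (by simp [PySem.List.len_eq]; omega)]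
      rw [List.foldl_cons]
      have hstep : prefixStep bg (s : Int) = bg.set s (bg.getD s 0 + bg.getD (s-1) 0) := by
        unfold prefixStep
        rw [PySem.List.pySetD_of_nonneg bg _ (by omega)]
        have h1 : PySem.List.pyGetD bg (s : Int) 0 = bg.getD s 0 := by simp [pysem]
        have h2 : PySem.List.pyGetD bg ((s : Int) - 1) 0 = bg.getD (s-1) 0 := by
          have : ((s : Int) - 1) = ((s - 1 : Nat) : Int) := by omega
          rw [this]; simp [pysem]
        rw [h1, h2]; simp
      set bg' := bg.set s (bg.getD s 0 + bg.getD (s-1) 0) with hbg'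
      have hlen' : bg'.length = bg.length := by simp [hbg']
      have hrange : PySem.List.pyRange ((s : Int) + 1) (PySem.List.len bg) 1
          = PySem.List.pyRange ((s + 1 : Nat) : Int) (PySem.List.len bg') 1 := by
        simp [PySem.List.len_eq, hlen']
      rw [hstep, hrange]
      obtain ⟨ihlen, ihget⟩ := ih bg' (s + 1) (by omega) (by omega)
      refine ⟨by rw [ihlen, hlen'], fun k hk => ?_⟩
      rw [ihget k (by omega)]
      have hg' : ∀ m : Nat, bg'.getD m 0 =
          if s = m ∧ m < bg.length then bg.getD s 0 + bg.getD (s-1) 0 else bg.getD m 0 := by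
        intro m; rw [hbg', getD_set]
      by_cases hks : k < s
      · rw [if_pos (by omega), if_pos (by omega), hg', if_neg (by omega)]
      · by_cases hke : k = s
        · rw [if_pos (by omega), if_neg (by omega), hg', if_pos (by omega)]
          have hset : Finset.Ico (s - 1) (k + 1) = {s - 1, s} := by
            ext j; simp [Finset.mem_Ico]; omega
          rw [hset, Finset.sum_pair (by omega : s - 1 ≠ s)]
          ring
        · rw [if_neg (by omega), if_neg (by omega)]
          simp only [Nat.add_sub_cancel]
          rw [Finset.sum_eq_sum_Ico_succ_bot (by omega : s < k + 1) (fun j => bg'.getD j 0)]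
          have hcong : ∑ j ∈ Finset.Ico (s+1) (k+1), bg'.getD j 0
              = ∑ j ∈ Finset.Ico (s+1) (k+1), bg.getD j 0 := by
            refine Finset.sum_congr rfl (fun j hj => ?_)
            rw [hg' j, if_neg (by simp [Finset.mem_Ico] at hj; omega)]
          rw [hcong, hg' s, if_pos ⟨rfl, by omega⟩]
          rw [Finset.sum_eq_sum_Ico_succ_bot (by omega : s - 1 < k + 1) (fun j => bg.getD j 0)]
          have hs1 : s - 1 + 1 = s := by omega
          rw [hs1]
          rw [Finset.sum_eq_sum_Ico_succ_bot (by omega : s < k + 1) (fun j => bg.getD j 0)]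
          ring
    · rw [PySem.List.pyRange_one_eq_nil (by simp [PySem.List.len_eq]; omega)]
      refine ⟨by simp, fun k hk => ?_⟩
      simp only [List.foldl_nil]
      rw [if_pos (by omega)]

lemma solve_length (A : Int) (B : List (List Int)) : (solve A B).length = A.toNat := by
  simp only [solve]
  rw [PySem.List.foldl_pyRange_zero_pyGetD B [] solveStep (List.replicate A.toNat 0)]
  set bg1 := B.foldl solveStep (List.replicate A.toNat 0) with hbg1
  have hlen1 : bg1.length = A.toNat := by
    rw [hbg1, fold1_length, List.length_replicate]
  have hpf := (prefix_fold bg1.length bg1 1 le_rfl (by omega)).1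
  simp only [Nat.cast_one] at hpf
  rw [hpf, hlen1]

-- ===== B-side lemmas =====

lemma clampIdx_eval (n : Nat) (s : Int) (h1 : -(n : Int) ≤ s) (h2 : s ≤ (n : Int)) :
    ((PySem.List.clampIdx n s : Nat) : Int) = if s < 0 then s + n else s := by
  simp only [PySem.List.clampIdx]
  split_ifs <;> omega

lemma clampIdx_le' (n : Nat) (s : Int) : PySem.List.clampIdx n s ≤ n := by
  simp only [PySem.List.clampIdx]
  split_ifs <;> omega

lemma slice_none_some' (xs : List Int) (s : Int) :
    PySem.List.slice xs none (some s) = xs.take (PySem.List.clampIdx xs.length s) := by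
  simp [PySem.List.slice]

-- one suffix update total[s:] = [f x for x in total[s:]] as take/drop at the clamped index
lemma stage_eq (xs : List Int) (s : Int) (f : Int → Int) :
    PySem.List.slice xs none (some s) ++ (PySem.List.slice xs (some s) none).map f
      = xs.take (PySem.List.clampIdx xs.length s) ++
        (xs.drop (PySem.List.clampIdx xs.length s)).map f := by
  rw [slice_none_some', PySem.List.slice_some_none]

lemma stage_length (xs : List Int) (e : Nat) (f : Int → Int) (he : e ≤ xs.length) :
    (xs.take e ++ (xs.drop e).map f).length = xs.length := by
  simp
  omega

lemma stage_getD (xs : List Int) (e : Nat) (f : Int → Int) (k : Nat)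
    (hk : k < xs.length) (he : e ≤ xs.length) :
    (xs.take e ++ (xs.drop e).map f).getD k 0 =
      if k < e then xs.getD k 0 else f (xs.getD k 0) := by
  simp only [List.getD]
  by_cases hke : k < e
  · rw [List.getElem?_append_left (by simp; omega), if_pos hke]
    simp [hke]
  · rw [List.getElem?_append_right (by simp; omega), if_neg hke]
    simp only [List.length_take, List.getElem?_map, List.getElem?_drop]
    have harg : e + (k - min e xs.length) = k := by omega
    rw [harg, List.getElem?_eq_getElem hk]
    simp

lemma bstep_length (total q : List Int) : (bstep total q).length = total.length := by
  simp only [bstep, stage_eq]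
  rw [stage_length _ _ _ (clampIdx_le' _ _), stage_length _ _ _ (clampIdx_le' _ _)]

lemma bstep_getD (total q : List Int)
    (hq : (-(total.length : Int) ≤ q.getD 0 0 - 1 ∧ q.getD 0 0 - 1 < (total.length : Int)) ∧
      (q.getD 1 0 = (total.length : Int) ∨
        (-(total.length : Int) ≤ q.getD 1 0 ∧ q.getD 1 0 < (total.length : Int)))) 
    (k : Nat) (hk : k < total.length) :
    (bstep total q).getD k 0 = total.getD k 0 + c2 (total.length : Int) q k := by
  obtain ⟨⟨hL1, hL2⟩, hR⟩ := hq
  have e0 : PySem.List.pyGetD q 0 0 = q.getD 0 0 := by simp [pysem]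
  have e1 : PySem.List.pyGetD q 1 0 = q.getD 1 0 := by simp [pysem]
  have e2 : PySem.List.pyGetD q 2 0 = q.getD 2 0 := by simp [pysem]
  simp only [bstep, e0, e1, e2, stage_eq]
  set N := total.length with hN
  set w1 := if q.getD 0 0 - 1 < 0 then q.getD 0 0 - 1 + (N : Int) else q.getD 0 0 - 1 with hw1
  set E1 := PySem.List.clampIdx N (q.getD 0 0 - 1) with hE1
  have hce1 : ((E1 : Nat) : Int) = w1 := clampIdx_eval N _ hL1 (by omega)
  have hw1b : 0 ≤ w1 ∧ w1 < (N : Int) := by rw [hw1]; split_ifs <;> omega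
  set t1 := total.take E1 ++ (total.drop E1).map (fun x => x + q.getD 2 0) with ht1
  have hlen1 : t1.length = N := by rw [ht1]; exact stage_length _ _ _ (by omega)
  have ht1getD : ∀ m : Nat, m < N →
      t1.getD m 0 = total.getD m 0 + if w1 ≤ (m : Int) then q.getD 2 0 else 0 := by
    intro m hm
    rw [ht1, stage_getD total E1 _ m hm (by omega)]
    have hml : m < E1 ↔ ¬ w1 ≤ (m : Int) := by clear_value t1 E1 w1; omega
    by_cases hmE : m < E1
    · rw [if_pos hmE, if_neg (hml.mp hmE)]
      ring
    · rw [if_neg hmE, if_pos (not_not.mp (mt hml.mpr hmE))]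
  rw [hlen1]
  set E2 := PySem.List.clampIdx N (q.getD 1 0) with hE2
  rcases hR with hReq | ⟨hR1, hR2⟩
  · have hce2 : ((E2 : Nat) : Int) = (N : Int) := by
      rw [hE2, hReq]; exact clampIdx_eval N _ (by omega) (by omega)
    rw [stage_getD t1 E2 _ k (by omega) (by omega),
      if_pos (by clear_value t1 E1 w1 E2; omega), ht1getD k hk]
    simp only [c2]
    rw [← hw1]
    simp only [hReq, ne_eq, not_true_eq_false, false_and, if_false]
    ring
  · set w2 := if q.getD 1 0 < 0 then q.getD 1 0 + (N : Int) else q.getD 1 0 with hw2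
    have hce2 : ((E2 : Nat) : Int) = w2 := clampIdx_eval N _ hR1 (by omega)
    have hw2b : 0 ≤ w2 ∧ w2 < (N : Int) := by rw [hw2]; split_ifs <;> omega
    have hRne : q.getD 1 0 ≠ ((N : Nat) : Int) := by omega
    rw [stage_getD t1 E2 _ k (by omega) (by omega), ht1getD k hk]
    simp only [c2]
    rw [← hw1, ← hw2]
    simp only [ne_eq, hRne, not_false_eq_true, true_and]
    clear ht1getD hlen1 e0 e1 e2
    clear_value t1
    clear t1 ht1
    clear_value w1 E1 w2 E2 N
    split_ifs <;> first | (exfalso; omega) | ring1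

lemma foldB_getD (Bq : List (List Int)) (bg : List Int)
    (hPre : ∀ q ∈ Bq,
      (-(bg.length : Int) ≤ q.getD 0 0 - 1 ∧ q.getD 0 0 - 1 < (bg.length : Int)) ∧
      (q.getD 1 0 = (bg.length : Int) ∨
        (-(bg.length : Int) ≤ q.getD 1 0 ∧ q.getD 1 0 < (bg.length : Int)))) :
    (Bq.foldl bstep bg).length = bg.length ∧
    ∀ k : Nat, k < bg.length → (Bq.foldl bstep bg).getD k 0 =
      bg.getD k 0 + (Bq.map (fun q => c2 (bg.length : Int) q (k : Int))).sum := by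
  induction Bq generalizing bg with
  | nil => exact ⟨rfl, fun k _ => by simp⟩
  | cons q qs ih =>
    have hlen : (bstep bg q).length = bg.length := bstep_length bg q
    obtain ⟨ihlen, ihget⟩ := ih (bstep bg q)
      (by intro q' hq'; rw [hlen]; exact hPre q' (List.mem_cons_of_mem q hq'))
    refine ⟨by rw [List.foldl_cons, ihlen, hlen], fun k hk => ?_⟩
    rw [List.foldl_cons, ihget k (by omega), hlen,
      bstep_getD bg q (hPre q List.mem_cons_self) k hk]
    simp only [List.map_cons, List.sum_cons]
    ring

-- summing a point indicator over range (k+1)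
lemma sum_indicator (c P : Int) (k : Nat) (hc : 0 ≤ c) :
    ∑ j ∈ Finset.range (k + 1), (if c = (j : Int) then P else 0) =
      if c ≤ (k : Int) then P else 0 := by
  have he : ∀ j ∈ Finset.range (k + 1),
      (if c = (j : Int) then P else 0) = if j = c.toNat then P else 0 := by
    intro j hj
    split_ifs <;> first | rfl | omega
  rw [Finset.sum_congr rfl he,
    Finset.sum_ite_eq' (Finset.range (k + 1)) c.toNat (fun _ => P)]
  simp only [Finset.mem_range]
  split_ifs <;> first | rfl | omega

-- the prefix sum of A's per-query delta equals B's per-query suffix contribution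
lemma sum_contrib (N : Int) (q : List Int) (k : Nat)
    (hL : -N ≤ q.getD 0 0 - 1 ∧ q.getD 0 0 - 1 < N)
    (hR : q.getD 1 0 = N ∨ (-N ≤ q.getD 1 0 ∧ q.getD 1 0 < N)) :
    ∑ j ∈ Finset.range (k + 1), contrib N q (j : Int) = c2 N q (k : Int) := by
  simp only [contrib, c2]
  set w1 := if q.getD 0 0 - 1 < 0 then q.getD 0 0 - 1 + N else q.getD 0 0 - 1 with hw1
  set w2 := if q.getD 1 0 < 0 then q.getD 1 0 + N else q.getD 1 0 with hw2
  have hw1b : 0 ≤ w1 := by rw [hw1]; split_ifs <;> omega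
  rw [Finset.sum_sub_distrib, sum_indicator w1 (q.getD 2 0) k hw1b]
  rcases hR with hReq | ⟨hR1, hR2⟩
  · simp only [hReq, ne_eq, not_true_eq_false, false_and, if_false, Finset.sum_const_zero]
  · have hRne : q.getD 1 0 ≠ N := by omega
    have hw2b : 0 ≤ w2 := by rw [hw2]; split_ifs <;> omega
    simp only [ne_eq, hRne, not_false_eq_true, true_and]
    rw [sum_indicator w2 (q.getD 2 0) k hw2b]

-- exchanging the j-sum and the query-sum
lemma sum_swap_list (l : List (List Int)) (k : Nat) (f : List Int → Int → Int) :
    ∑ j ∈ Finset.range (k + 1), (l.map (fun q => f q (j : Int))).sum =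
      (l.map (fun q => ∑ j ∈ Finset.range (k + 1), f q (j : Int))).sum := by
  induction l with
  | nil => simp
  | cons q qs ih => simp [Finset.sum_add_distrib, ih]

-- ===== VERDICT (by name: the statement is the Claim_ definition above) =====
theorem solve_spec : Claim_equal_solve := by
  intro A B _hDom hPre
  unfold Spec_solve
  have hPre' : ∀ q ∈ B,
      (-(((List.replicate A.toNat (0:Int)).length : Nat) : Int) ≤ q.getD 0 0 - 1 ∧
        q.getD 0 0 - 1 < (((List.replicate A.toNat (0:Int)).length : Nat) : Int)) ∧
      (q.getD 1 0 = (((List.replicate A.toNat (0:Int)).length : Nat) : Int) ∨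
        (-(((List.replicate A.toNat (0:Int)).length : Nat) : Int) ≤ q.getD 1 0 ∧
          q.getD 1 0 < (((List.replicate A.toNat (0:Int)).length : Nat) : Int))) := by
    intro q hq
    obtain ⟨_, hq1, hq2⟩ := hPre q hq
    rw [List.length_replicate]
    exact ⟨hq1, hq2⟩
  obtain ⟨hBlen, hBget⟩ := foldB_getD B (List.replicate A.toNat 0) hPre'
  have hlenA : (solve A B).length = A.toNat := solve_length A B
  have hlenB : (solve_alt A B).length = A.toNat := by
    simp only [solve_alt]
    rw [hBlen, List.length_replicate]
  apply List.ext_getElem (by rw [hlenA, hlenB])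
  intro k hk1 hk2
  rw [← List.getD_eq_getElem (solve A B) 0 hk1, ← List.getD_eq_getElem (solve_alt A B) 0 hk2]
  have hkn : k < A.toNat := by rw [← hlenA]; exact hk1
  -- B-side value
  have hrhs : (solve_alt A B).getD k 0
      = (B.map (fun q => c2 ((A.toNat : Nat) : Int) q (k : Int))).sum := by
    simp only [solve_alt]
    rw [hBget k (by rw [List.length_replicate]; omega)]
    simp
  rw [hrhs]
  -- A-side value
  simp only [solve]
  rw [PySem.List.foldl_pyRange_zero_pyGetD B [] solveStep (List.replicate A.toNat 0)]
  set bg1 := B.foldl solveStep (List.replicate A.toNat 0) with hbg1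
  have hlen1 : bg1.length = A.toNat := by
    rw [hbg1, fold1_length, List.length_replicate]
  have hbg1getD : ∀ j, j < A.toNat →
      bg1.getD j 0 = (B.map (fun q => contrib ((A.toNat : Nat) : Int) q (j : Int))).sum := by
    intro j hj
    rw [hbg1, fold1_getD B (List.replicate A.toNat 0) hPre' j (by rw [List.length_replicate]; omega)]
    simp
  have hpf := (prefix_fold bg1.length bg1 1 le_rfl (by omega)).2 k (by omega)
  simp only [Nat.cast_one] at hpf
  rw [hpf]
  have hform : (if k < 1 then bg1.getD k 0 else ∑ j ∈ Finset.Ico (1 - 1) (k + 1), bg1.getD j 0)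
      = ∑ j ∈ Finset.range (k + 1), bg1.getD j 0 := by
    rw [← Finset.range_eq_Ico]
    split_ifs with hk0
    · have : k = 0 := by omega
      rw [this]
      simp
    · rfl
  rw [hform]
  have hsum : ∑ j ∈ Finset.range (k + 1), bg1.getD j 0
      = ∑ j ∈ Finset.range (k + 1),
          (B.map (fun q => contrib ((A.toNat : Nat) : Int) q (j : Int))).sum := by
    refine Finset.sum_congr rfl (fun j hj => ?_)
    simp only [Finset.mem_range] at hj
    exact hbg1getD j (by omega)
  rw [hsum, sum_swap_list B k (fun q j => contrib ((A.toNat : Nat) : Int) q j)]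
  refine congrArg List.sum (List.map_congr_left (fun q hq => ?_))
  obtain ⟨_, hq1, hq2⟩ := hPre q hq
  exact sum_contrib ((A.toNat : Nat) : Int) q k hq1 hq2
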